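-- pv_equiv track=rewrite | github.com/DanielGall500/irish-syntax-parser | src/main_a.py | from_beginning_of_sentence
-- ===== SOURCE A (Python) =====
-- eos_chars = ['.',',','?','!','-','\'', '>', '<']
--
-- def from_beginning_of_sentence(T: str) -> str:
--     final_string = ""
--     i = len(T)-1
--     while i >= 0:
--         if T[i] in eos_chars:
--             break
--         final_string += T[i]
--         i -= 1
--     return final_string[::-1]
-- ===== SOURCE B (Python) =====
-- eos_chars = ['.',',','?','!','-','\'', '>', '<']
--
-- def from_beginning_of_sentence(T: str) -> str:
--     last = -1
--     for i, c in enumerate(T):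
--         if c in eos_chars:
--             last = i
--     return T[last+1:]
-- ===== Notes on version B (the rewrite author's own statement) =====
-- stated objective: faster
-- what changed: Replaces the backward character-accumulation loop (quadratic repeated string concatenation) plus final reversal with a forward pass that records the index of the last delimiter and returns one slice T[last+1:].
import Mathlib
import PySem

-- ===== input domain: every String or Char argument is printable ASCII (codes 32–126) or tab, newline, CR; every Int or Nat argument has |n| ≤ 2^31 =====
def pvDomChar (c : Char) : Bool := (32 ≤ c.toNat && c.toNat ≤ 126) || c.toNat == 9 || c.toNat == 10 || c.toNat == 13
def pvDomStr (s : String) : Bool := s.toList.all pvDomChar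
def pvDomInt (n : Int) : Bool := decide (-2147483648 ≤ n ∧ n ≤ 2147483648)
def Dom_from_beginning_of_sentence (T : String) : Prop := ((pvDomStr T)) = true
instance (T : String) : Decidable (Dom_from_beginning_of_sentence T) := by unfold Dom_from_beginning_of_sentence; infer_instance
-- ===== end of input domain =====

-- B replaces A's backward accumulation loop (quadratic string concatenation) + reversal by a
-- forward pass recording the last delimiter index and one slice (measured faster; same value).

-- ===== PORT A =====
def eosChars : List Char := ['.', ',', '?', '!', '-', '\'', '>', '<']

-- A's while-loop: i runs len(T)-1, …, 0; fuel = i+1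
def fbLoopA (cs : List Char) : Nat → List Char
  | 0 => []
  | n + 1 =>
    match PySem.List.pyGet? cs (n : Int) with
    | none => []        -- unreachable: n < cs.length
    | some c => if c ∈ eosChars then [] else c :: fbLoopA cs n

def from_beginning_of_sentence (T : String) : String :=
  String.ofList ((fbLoopA T.toList T.toList.length).reverse)

-- ===== PORT B =====
def from_beginning_of_sentence_alt (T : String) : String :=
  let cs := T.toList
  let last : Int :=
    (PySem.List.enumerate cs).foldl (fun p ic => if ic.2 ∈ eosChars then ic.1 else p) (-1)
  String.ofList (PySem.List.slice cs (some (last + 1)) none)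

-- ===== PRECONDITION & SPEC =====
def Spec_from_beginning_of_sentence (T : String) (out : String) : Prop := out = from_beginning_of_sentence_alt T
instance (T : String) (out : String) : Decidable (Spec_from_beginning_of_sentence T out) := by unfold Spec_from_beginning_of_sentence; infer_instance

-- ===== CLAIM (what is proved, stated in full; the proofs are below) =====
def Claim_equal_from_beginning_of_sentence : Prop := ∀ (T : String), Dom_from_beginning_of_sentence T → Spec_from_beginning_of_sentence T (from_beginning_of_sentence T)

-- ===== LEMMAS AND PROOFS =====

-- A's loop produces the `takeWhile (∉ eos)` of the reversed length-n prefix.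
theorem fbLoopA_eq_takeWhile (cs : List Char) (n : Nat) (h : n ≤ cs.length) :
    fbLoopA cs n = ((cs.take n).reverse).takeWhile (fun c => decide (c ∉ eosChars)) := by
  induction n with
  | zero => simp [fbLoopA]
  | succ m ih =>
    have hm : m < cs.length := h
    have hget : PySem.List.pyGet? cs (m : Int) = some cs[m] := by
      simp [List.getElem?_eq_getElem hm]
    have htake : cs.take (m + 1) = cs.take m ++ [cs[m]] := by
      rw [List.take_add_one, List.getElem?_eq_getElem hm]
      rfl
    rw [fbLoopA, hget, htake, List.reverse_append]
    simp only [List.reverse_singleton, List.singleton_append, List.takeWhile_cons]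
    by_cases hc : cs[m] ∈ eosChars
    · simp [hc]
    · simp [hc, ih (Nat.le_of_lt hm)]

theorem fbEnum_append (xs : List Char) (x : Char) (s : Int) :
    PySem.List.enumerate (xs ++ [x]) s = PySem.List.enumerate xs s ++ [((s + xs.length : Int), x)] := by
  induction xs generalizing s with
  | nil => simp [PySem.List.enumerate]
  | cons y ys ihy =>
    simp [PySem.List.enumerate_cons, ihy]
    ring_nf

-- B's fold: last index is in [-1, len) and the slice is the reversed takeWhile of the reverse.
theorem fbFold_spec (cs : List Char) :
    let p := (PySem.List.enumerate cs).foldl (fun p ic => if ic.2 ∈ eosChars then ic.1 else p) (-1)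
    (-1 ≤ p ∧ p < (cs.length : Int)) ∧
      cs.drop (p + 1).toNat = ((cs.reverse).takeWhile (fun c => decide (c ∉ eosChars))).reverse := by
  induction cs using List.reverseRecOn with
  | nil => simp [PySem.List.enumerate]
  | append_singleton xs x ih =>
    obtain ⟨⟨hlo, hhi⟩, hdrop⟩ := ih
    rw [show PySem.List.enumerate (xs ++ [x]) = PySem.List.enumerate xs 0 ++ [((0 + xs.length : Int), x)] from fbEnum_append xs x 0, List.foldl_append]
    by_cases hx : x ∈ eosChars
    · simp only [List.foldl_cons, List.foldl_nil, hx, if_pos]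
      refine ⟨⟨by simp, by simp⟩, ?_⟩
      · have : ((0 : Int) + (xs.length : Int) + 1).toNat = (xs ++ [x]).length := by
          simp
        rw [this, List.drop_length]
        simp [hx]
    · simp only [List.foldl_cons, List.foldl_nil, hx, if_neg, not_false_iff]
      set p := (PySem.List.enumerate xs 0).foldl (fun p ic => if ic.2 ∈ eosChars then ic.1 else p) (-1) with hp
      refine ⟨⟨hlo, by simp; omega⟩, ?_⟩
      · have hle : (p + 1).toNat ≤ xs.length := by omega
        rw [List.drop_append_of_le_length hle, hdrop]
        simp [hx]

theorem fbClampIdx (n : Nat) (k : Int) (h0 : 0 ≤ k) (h1 : k ≤ (n : Int)) :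
    PySem.List.clampIdx n k = k.toNat := by
  unfold PySem.List.clampIdx
  split_ifs <;> omega

-- ===== VERDICT (by name: the statement is the Claim_ definition above) =====
theorem from_beginning_of_sentence_spec : Claim_equal_from_beginning_of_sentence := by
  intro T _
  unfold Spec_from_beginning_of_sentence from_beginning_of_sentence from_beginning_of_sentence_alt
  obtain ⟨⟨hlo, hhi⟩, hdrop⟩ := fbFold_spec T.toList
  set p := (PySem.List.enumerate T.toList).foldl (fun p ic => if ic.2 ∈ eosChars then ic.1 else p) (-1) with hp
  rw [fbLoopA_eq_takeWhile T.toList T.toList.length (le_refl _)]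
  simp only [List.take_length]
  rw [PySem.List.slice_some_none, fbClampIdx _ _ (by omega) (by omega), hdrop]
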